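-- pv_equiv track=rewrite | github.com/ThePracticalHow/TrueHumanAtlas | legacy_tools/staff_binary_transcripter.py | decode_bam_seq
-- ===== SOURCE A (Python) =====
-- SEQ_DECODE = '=ACMGRSVTWYHKDBN'
--
-- def decode_bam_seq(encoded_bytes, seq_len):
--     """Decode BAM 4-bit packed sequence to ATCG string."""
--     seq = []
--     for i in range(seq_len):
--         byte_idx = i >> 1
--         if byte_idx >= len(encoded_bytes):
--             break
--         if i & 1:
--             val = encoded_bytes[byte_idx] & 0x0F
--         else:
--             val = (encoded_bytes[byte_idx] >> 4) & 0x0F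
--         seq.append(SEQ_DECODE[val])
--     return ''.join(seq)
-- ===== SOURCE B (Python) =====
-- SEQ_DECODE = '=ACMGRSVTWYHKDBN'
--
-- def decode_bam_seq(encoded_bytes, seq_len):
--     """Decode BAM 4-bit packed sequence to ATCG string."""
--     if seq_len < 0:
--         return ''
--     full = ''.join(SEQ_DECODE[(b >> 4) & 0xF] + SEQ_DECODE[b & 0xF]
--                    for b in encoded_bytes)
--     return full[:seq_len]
-- ===== Notes on version B (the rewrite author's own statement) =====
-- stated objective: simpler
-- what changed: B decodes whole bytes (two nibbles per byte) into a full string and slices it to seq_len, replacing A's per-output-position loop with index math and a break.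
import Mathlib
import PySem

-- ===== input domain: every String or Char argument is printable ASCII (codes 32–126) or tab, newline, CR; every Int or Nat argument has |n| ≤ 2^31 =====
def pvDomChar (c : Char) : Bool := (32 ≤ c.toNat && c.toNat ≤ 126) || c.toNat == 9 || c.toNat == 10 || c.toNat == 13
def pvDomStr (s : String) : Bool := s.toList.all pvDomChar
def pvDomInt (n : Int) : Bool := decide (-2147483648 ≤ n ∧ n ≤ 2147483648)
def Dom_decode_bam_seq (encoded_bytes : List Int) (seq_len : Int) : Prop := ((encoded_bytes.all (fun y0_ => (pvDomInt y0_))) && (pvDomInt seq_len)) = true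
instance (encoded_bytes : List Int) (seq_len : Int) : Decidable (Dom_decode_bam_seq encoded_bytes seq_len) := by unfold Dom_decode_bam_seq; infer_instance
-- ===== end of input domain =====

-- B decodes whole bytes (two nibbles each) into the full string and slices to seq_len,
-- replacing A's per-output-position loop (index math + break) — objective: simpler.

-- SEQ_DECODE = '=ACMGRSVTWYHKDBN'
def pvSeqDecode : List Char := "=ACMGRSVTWYHKDBN".toList

-- ===== PORT A =====
-- `for i in range(seq_len): ... break ...` as recursion on the loop index i
-- (range is lazy in Python; the recursion stops at i = seq_len or at the `break`)
def pvDecodeLoopA (encoded_bytes : List Int) (seq_len : Int) (i : Int) : List Char :=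
  if h : seq_len ≤ i then []
  else
    let byte_idx := i >>> (1:Nat)   -- `i >> 1` (Lean's Int >>> floors, Python-exact)
    if (encoded_bytes.length : Int) ≤ byte_idx then []   -- `break`
    else
      let val := if PySem.Int.band i 1 = 1
        then PySem.Int.band (PySem.List.pyGetD encoded_bytes byte_idx 0) 15   -- `encoded_bytes[byte_idx] & 0x0F` (index guarded above)
        else PySem.Int.band ((PySem.List.pyGetD encoded_bytes byte_idx 0) >>> (4:Nat)) 15  -- `(encoded_bytes[byte_idx] >> 4) & 0x0F`
      PySem.List.pyGetD pvSeqDecode val ' ' :: pvDecodeLoopA encoded_bytes seq_len (i + 1)  -- SEQ_DECODE[val]; val ∈ [0,16) so in range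
termination_by (seq_len - i).toNat
decreasing_by omega

def decode_bam_seq (encoded_bytes : List Int) (seq_len : Int) : String :=
  String.ofList (pvDecodeLoopA encoded_bytes seq_len 0)

-- ===== PORT B =====
-- the two characters one byte of `encoded_bytes` contributes
def pvByteChars (b : Int) : List Char :=
  [PySem.List.pyGetD pvSeqDecode (PySem.Int.band (b >>> (4:Nat)) 15) ' ',
   PySem.List.pyGetD pvSeqDecode (PySem.Int.band b 15) ' ']

def decode_bam_seq_alt (encoded_bytes : List Int) (seq_len : Int) : String :=
  if seq_len < 0 then ""
  else String.ofList ((encoded_bytes.flatMap pvByteChars).take seq_len.toNat)  -- full[:seq_len] with 0 ≤ seq_len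

-- ===== PRECONDITION & SPEC =====
def Spec_decode_bam_seq (encoded_bytes : List Int) (seq_len : Int) (out : String) : Prop := out = decode_bam_seq_alt encoded_bytes seq_len
instance (encoded_bytes : List Int) (seq_len : Int) (out : String) : Decidable (Spec_decode_bam_seq encoded_bytes seq_len out) := by unfold Spec_decode_bam_seq; infer_instance

-- ===== CLAIM (what is proved, stated in full; the proofs are below) =====
def Claim_equal_decode_bam_seq : Prop := ∀ (encoded_bytes : List Int) (seq_len : Int), Dom_decode_bam_seq encoded_bytes seq_len → Spec_decode_bam_seq encoded_bytes seq_len (decode_bam_seq encoded_bytes seq_len)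

-- ===== LEMMAS AND PROOFS =====

lemma pvLength_flatMap_pair (l : List Int) :
    (l.flatMap pvByteChars).length = 2 * l.length := by
  induction l with
  | nil => simp
  | cons c t ih => simp [pvByteChars, ih]; omega

-- the a-th character of B's full decode is the a-th nibble's character
lemma pvGetElem?_flatMap_pair (l : List Int) (a : Nat) :
    (l.flatMap pvByteChars)[a]? =
      (l[a / 2]?).map (fun b =>
        if a % 2 = 1 then PySem.List.pyGetD pvSeqDecode (PySem.Int.band b 15) ' '
        else PySem.List.pyGetD pvSeqDecode (PySem.Int.band (b >>> (4:Nat)) 15) ' ') := by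
  induction l generalizing a with
  | nil => simp
  | cons c t ih =>
    match a with
    | 0 => simp [pvByteChars]
    | 1 => simp [pvByteChars]
    | (k+2) =>
      have h2 : (k + 2) / 2 = k / 2 + 1 := by omega
      have h3 : (k + 2) % 2 = k % 2 := by omega
      simp [pvByteChars, h2, h3, ih k]

-- A's loop from index a up to b equals B's full decode dropped a and taken (b-a)
lemma pvLoop_eq (encoded : List Int) (b a : Int) (ha : 0 ≤ a) :
    pvDecodeLoopA encoded b a =
      ((encoded.flatMap pvByteChars).drop a.toNat).take (b - a).toNat := by
  rw [pvDecodeLoopA]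
  by_cases hab : b ≤ a
  · rw [dif_pos hab]
    have : (b - a).toNat = 0 := by omega
    simp [this]
  · rw [dif_neg hab]
    rw [not_le] at hab
    have hfl := pvLength_flatMap_pair encoded
    have hshift : a >>> (1:Nat) = a / 2 := by
      simp [Int.shiftRight_eq_div_pow]
    rw [hshift]
    by_cases hbig : (encoded.length : Int) ≤ a / 2
    · -- break: a/2 ≥ len, so the drop reaches past the end of B's full decode
      rw [if_pos hbig, List.drop_of_length_le (by omega), List.take_nil]
    · rw [if_neg hbig]
      rw [not_le] at hbig
      have hidx : a.toNat / 2 < encoded.length := by omega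
      have hlt : a.toNat < (encoded.flatMap pvByteChars).length := by omega
      have htk : (b - a).toNat = ((b - (a+1)).toNat) + 1 := by omega
      rw [List.drop_eq_getElem_cons hlt, htk, List.take_succ_cons]
      have hget : (encoded.flatMap pvByteChars)[a.toNat] =
          (if a.toNat % 2 = 1 then PySem.List.pyGetD pvSeqDecode (PySem.Int.band encoded[a.toNat / 2] 15) ' '
           else PySem.List.pyGetD pvSeqDecode (PySem.Int.band (encoded[a.toNat / 2] >>> (4:Nat)) 15) ' ') := by
        have h := pvGetElem?_flatMap_pair encoded a.toNat
        rw [List.getElem?_eq_getElem hlt, List.getElem?_eq_getElem hidx] at h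
        simpa using h
      have hbidx : PySem.List.pyGetD encoded (a / 2) 0 = encoded[a.toNat / 2] := by
        rw [PySem.List.pyGetD_eq_getElem _ _ (by omega) (by omega)]
        congr 1
        omega
      have hcond : (PySem.Int.band a 1 = 1) ↔ (a.toNat % 2 = 1) := by
        rw [PySem.Int.band_one, PySem.Int.mod_eq_emod_of_pos (by norm_num)]
        omega
      -- head: A's nibble character = character a of B's full decode
      have hhead : PySem.List.pyGetD pvSeqDecode
          (if PySem.Int.band a 1 = 1
            then PySem.Int.band (PySem.List.pyGetD encoded (a / 2) 0) 15
            else PySem.Int.band ((PySem.List.pyGetD encoded (a / 2) 0) >>> (4:Nat)) 15) ' '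
          = (encoded.flatMap pvByteChars)[a.toNat] := by
        rw [hget, hbidx]
        by_cases hodd : a.toNat % 2 = 1
        · rw [if_pos (hcond.mpr hodd), if_pos hodd]
        · rw [if_neg (fun h => hodd (hcond.mp h)), if_neg hodd]
      -- tail: recurse at a+1
      have h1 : (a + 1).toNat = a.toNat + 1 := by omega
      have htail : pvDecodeLoopA encoded b (a + 1) =
          ((encoded.flatMap pvByteChars).drop (a.toNat + 1)).take (b - (a+1)).toNat := by
        rw [pvLoop_eq encoded b (a + 1) (by omega), h1]
      exact congrArg₂ List.cons hhead htail
termination_by (b - a).toNat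
decreasing_by omega

-- ===== VERDICT (by name: the statement is the Claim_ definition above) =====
theorem decode_bam_seq_spec : Claim_equal_decode_bam_seq := by
  intro encoded seq_len _
  unfold Spec_decode_bam_seq decode_bam_seq decode_bam_seq_alt
  rw [pvLoop_eq encoded seq_len 0 le_rfl]
  by_cases hneg : seq_len < 0
  · rw [if_pos hneg]
    have : seq_len.toNat = 0 := by omega
    simp [this]
  · rw [if_neg hneg]
    simp
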